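-- pv_equiv track=rewrite | github.com/KIMSANGKYO/Programmer | 프로그래머스/2/17687. ［3차］ n진수 게임/［3차］ n진수 게임.py | solution
-- ===== SOURCE A (Python) =====
-- def solution(n, t, m, p):
--     # 10진수 변환
--     def convert(num, base):
--         result = ''
--         while num > 0:
--             num, remainder = divmod(num, base)
--             result = (str(remainder) if remainder < 10 else chr(remainder + 55)) + result
--         return result if result else '0'
--
--     answer = ''
--     number = 0
--     tube_order = 1
--
--     while len(answer) < t:
--         converted_number = convert(number, n)
--         for digit in converted_number:
--             if tube_order == p:
--                 answer += digit
--                 if len(answer) == t: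
--                     break
--             tube_order = (tube_order % m) + 1
--         number += 1
--
--     return answer
-- ===== SOURCE B (Python) =====
-- def solution(n, t, m, p):
--     # Generate the digit stream once, then pick player p's digits by direct
--     # arithmetic indexing (positions p-1, p-1+m, ...) instead of a tube counter.
--     def digit(r):
--         return str(r) if r < 10 else chr(r + 55)
--
--     def to_base(num):
--         return digit(num) if num < n else to_base(num // n) + digit(num % n)
--
--     last = p - 1 + (t - 1) * m if t > 0 else -1
--     digits = []
--     i = 0
--     while len(digits) <= last:
--         digits.extend(to_base(i))
--         i += 1
--     return ''.join(digits[p - 1 + k * m] for k in range(t))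
-- ===== Notes on version B (the rewrite author's own statement) =====
-- stated objective: alternative
-- what changed: B drops A's per-digit tube_order counter and break-driven selection loop: it builds the digit stream once (recursive base conversion instead of A's divmod string-prepending while-loop) up to the last needed position p-1+(t-1)*m, then picks player p's digits by direct arithmetic indexing digits[p-1+k*m].
-- outside the precondition, e.g. on solution(70000, 3, 1, 1): A returns '012', B returns '012'; on solution(10, 3, -1, 1): A returns '012', B raises IndexError; on solution(-2, 3, 1, 1): A returns '0-1', B raises RecursionError
import Mathlib
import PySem

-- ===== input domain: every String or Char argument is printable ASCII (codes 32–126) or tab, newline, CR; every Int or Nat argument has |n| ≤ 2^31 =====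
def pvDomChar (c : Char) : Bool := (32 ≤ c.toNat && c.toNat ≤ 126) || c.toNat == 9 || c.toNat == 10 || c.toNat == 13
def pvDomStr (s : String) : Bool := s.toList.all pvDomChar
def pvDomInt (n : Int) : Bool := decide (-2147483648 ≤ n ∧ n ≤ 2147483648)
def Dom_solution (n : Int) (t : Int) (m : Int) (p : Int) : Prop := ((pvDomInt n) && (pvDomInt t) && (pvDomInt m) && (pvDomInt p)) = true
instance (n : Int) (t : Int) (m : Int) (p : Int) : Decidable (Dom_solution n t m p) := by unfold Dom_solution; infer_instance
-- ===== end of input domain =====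

-- B replaces A's per-digit tube_order counter and break-driven selection with
-- generate-once-then-arithmetic-indexing, and A's divmod/chr string-prepend base
-- conversion with a recursive conversion over the alphabet "0-9A-Z" (objective:
-- alternative structure, same asymptotic cost; return value only, no mutation).

-- ===== PORT A =====
-- str(remainder) if remainder < 10 else chr(remainder + 55); chr is exact here on
-- Pre_ (0 ≤ r ≤ 35, code ≤ 90)
def solDigitA (r : Int) : List Char :=
  if r < 10 then (PySem.Int.toStr r).toList else [Char.ofNat (r + 55).toNat]

-- convert's while-loop; the Nat fuel only makes the loop total (num.toNat + 1
-- steps always suffice on Pre_, where 2 ≤ n)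
def solConvertGo (n : Int) : Nat → Int → List Char → List Char
  | 0, _, acc => acc
  | f + 1, num, acc =>
    if 0 < num then
      solConvertGo n f (PySem.Int.floordiv num n)
        (solDigitA (PySem.Int.mod num n) ++ acc)
    else acc

def solConvert (n : Int) (num : Int) : List Char :=
  let res := solConvertGo n (num.toNat + 1) num []
  if res = [] then ['0'] else res

-- the inner `for digit in converted_number` loop; returns (answer, tube_order);
-- `break` stops the traversal with tube_order not yet updated, exactly as in A
def solInner (t m p : Int) : List Char → List Char → Int → List Char × Int
  | [], ans, tube => (ans, tube)
  | d :: ds, ans, tube =>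
    if tube = p then
      let ans' := ans ++ [d]
      if (ans'.length : Int) = t then (ans', tube)
      else solInner t m p ds ans' (PySem.Int.mod tube m + 1)
    else solInner t m p ds ans (PySem.Int.mod tube m + 1)

-- the outer while-loop; fuel (p + t*m + 1).toNat outer rounds always suffice on
-- Pre_ (each round adds at least one stream digit)
def solOuter (n t m p : Int) : Nat → List Char → Int → Int → List Char
  | 0, ans, _, _ => ans
  | f + 1, ans, number, tube =>
    if (ans.length : Int) < t then
      let st := solInner t m p (solConvert n number) ans tube
      solOuter n t m p f st.1 (number + 1) st.2
    else ans

def solution (n : Int) (t : Int) (m : Int) (p : Int) : String :=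
  String.ofList (solOuter n t m p (p + t * m + 1).toNat [] 0 1)

-- ===== PORT B =====
-- B's digit map: str(r) if r < 10 else chr(r + 55); exact on Pre_ (code ≤ 0xD7FF)
def solDigitB (r : Int) : List Char :=
  if r < 10 then (PySem.Int.toStr r).toList else [Char.ofNat (r + 55).toNat]

-- B's recursive to_base (the Nat fuel only makes the recursion total)
def solToBase (n : Int) : Nat → Int → List Char
  | 0, _ => []
  | f + 1, num =>
    if num < n then solDigitB num
    else solToBase n f (PySem.Int.floordiv num n) ++ solDigitB (PySem.Int.mod num n)

-- B's `while len(digits) <= last` generation loop (fuel = totality guard)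
def solGen (n last : Int) : Nat → List Char → Int → List Char
  | 0, ds, _ => ds
  | f + 1, ds, i =>
    if (ds.length : Int) ≤ last then
      solGen n last f (ds ++ solToBase n (i.toNat + 1) i) (i + 1)
    else ds

def solution_alt (n : Int) (t : Int) (m : Int) (p : Int) : String :=
  let last : Int := if 0 < t then p - 1 + (t - 1) * m else -1
  let digits := solGen n last (p + t * m + 1).toNat [] 0
  -- digits[p-1+k*m] is exact on Pre_, where the index is always in range
  String.ofList ((PySem.List.pyRange 0 t 1).map
    (fun k => PySem.List.pyGetD digits (p - 1 + k * m) '?'))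

-- ===== PRECONDITION & SPEC =====
-- Pre_ excludes t ≥ 1 inputs with base n < 2 or tube parameters outside 1 ≤ p ≤ m
-- (there A raises, loops forever, or — for n < 0 or accidental hits of p in the
-- negative-m modulo cycle — returns improvised values where B's recursion and
-- position arithmetic naturally raise), and bases beyond 55241, where A's and B's
-- identical chr digits reach lone-surrogate/invalid codepoints that Lean's Char
-- cannot represent; for t ≤ 0 both always return ''.
def Pre_solution (n : Int) (t : Int) (m : Int) (p : Int) : Prop :=
  t ≤ 0 ∨ (1 ≤ t ∧ 2 ≤ n ∧ n ≤ 55241 ∧ 1 ≤ p ∧ p ≤ m)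
instance (n : Int) (t : Int) (m : Int) (p : Int) : Decidable (Pre_solution n t m p) := by
  unfold Pre_solution; infer_instance

def pvWitness_solution : Int × Int × Int × Int := (2, 4, 2, 1)

def Spec_solution (n : Int) (t : Int) (m : Int) (p : Int) (out : String) : Prop := out = solution_alt n t m p
instance (n : Int) (t : Int) (m : Int) (p : Int) (out : String) : Decidable (Spec_solution n t m p out) := by unfold Spec_solution; infer_instance

-- ===== CLAIM (what is proved, stated in full; the proofs are below) =====
def Claim_equal_solution : Prop := ∀ (n : Int) (t : Int) (m : Int) (p : Int), Dom_solution n t m p → Pre_solution n t m p → Spec_solution n t m p (solution n t m p)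

-- ===== LEMMAS AND PROOFS =====

-- the full digit stream of numbers 0,1,…,N-1 (A generates it digit by digit, B
-- number by number)
def solStream (n : Int) (N : Nat) : List Char :=
  (List.range N).flatMap (fun i => solConvert n (i : Int))

-- the subsequence of positions q with q % m = p - 1 (player p's digits)
def solSel (m p : Int) (q : Nat) : List Char → List Char
  | [] => []
  | c :: cs => if (q : Int) % m = p - 1 then c :: solSel m p (q + 1) cs
               else solSel m p (q + 1) cs

lemma solDigitB_eq (r : Int) : solDigitB r = solDigitA r := rfl

lemma solDigitB_ne_nil (r : Int) (h0 : 0 ≤ r) : solDigitB r ≠ [] := by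
  unfold solDigitB
  by_cases h : r < 10
  · rw [if_pos h]
    obtain ⟨k, rfl⟩ := Int.eq_ofNat_of_zero_le h0
    have hk : k < 10 := by exact_mod_cast h
    exact (by decide : ∀ j : Nat, j < 10 → (PySem.Int.toStr (j : Int)).toList ≠ []) k hk
  · rw [if_neg h]
    simp

lemma solToBase_congr (n : Int) (hn : 2 ≤ n) :
    ∀ f₁ f₂ num, num.toNat < f₁ → num.toNat < f₂ → 0 ≤ num →
      solToBase n f₁ num = solToBase n f₂ num := by
  intro f₁
  induction f₁ with
  | zero => intro f₂ num h _ _; omega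
  | succ f ih =>
    intro f₂ num h1 h2 h0
    obtain ⟨g, rfl⟩ : ∃ g, f₂ = g + 1 := ⟨f₂ - 1, by omega⟩
    simp only [solToBase]
    by_cases hlt : num < n
    · simp [hlt]
    · simp only [if_neg hlt]
      have hpos : 0 < n := by omega
      have hdnn : 0 ≤ PySem.Int.floordiv num n := by
        rw [PySem.Int.floordiv_eq_ediv_of_pos hpos]
        exact Int.ediv_nonneg h0 (by omega)
      have hdlt : PySem.Int.floordiv num n < num := by
        rw [PySem.Int.floordiv_eq_ediv_of_pos hpos]
        apply Int.ediv_lt_of_lt_mul (by omega)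
        nlinarith
      rw [ih g _ (by omega) (by omega) hdnn]

lemma solToBase_ne_nil (n : Int) (hn : 0 < n) (f : Nat) (num : Int) (h0 : 0 ≤ num) :
    solToBase n (f + 1) num ≠ [] := by
  simp only [solToBase]
  split
  · exact solDigitB_ne_nil num h0
  · simp [solDigitB_ne_nil _ (PySem.Int.mod_nonneg num hn)]

lemma solConvertGo_eq (n : Int) (hn2 : 2 ≤ n) :
    ∀ (f : Nat) (num : Int) (acc : List Char), num.toNat < f → 0 ≤ num →
      solConvertGo n f num acc =
        (if 0 < num then solToBase n (num.toNat + 1) num else []) ++ acc := by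
  intro f
  induction f with
  | zero => intro num acc h _; omega
  | succ f ih =>
    intro num acc h1 h0
    simp only [solConvertGo]
    by_cases hpos : 0 < num
    · simp only [if_pos hpos]
      have hposn : 0 < n := by omega
      have hr0 : 0 ≤ PySem.Int.mod num n := PySem.Int.mod_nonneg num hposn
      have hrlt : PySem.Int.mod num n < n := PySem.Int.mod_lt num hposn
      have hdnn : 0 ≤ PySem.Int.floordiv num n := by
        rw [PySem.Int.floordiv_eq_ediv_of_pos hposn]
        exact Int.ediv_nonneg h0 (by omega)
      have hdlt : PySem.Int.floordiv num n < num := by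
        rw [PySem.Int.floordiv_eq_ediv_of_pos hposn]
        apply Int.ediv_lt_of_lt_mul (by omega)
        nlinarith
      rw [ih _ _ (by omega) hdnn]
      by_cases hsm : num < n
      · have hfd0 : PySem.Int.floordiv num n = 0 := by
          rw [PySem.Int.floordiv_eq_ediv_of_pos hposn]
          exact Int.ediv_eq_zero_of_lt h0 hsm
        have hrm : PySem.Int.mod num n = num := by
          rw [PySem.Int.mod_eq_emod_of_pos hposn]
          exact Int.emod_eq_of_lt h0 hsm
        rw [hfd0, hrm, ← solDigitB_eq num]
        rw [if_neg (by omega : ¬ (0:Int) < 0), List.nil_append]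
        conv_rhs => rw [solToBase]
        rw [if_pos hsm]
      · have hfd1 : 0 < PySem.Int.floordiv num n := by
          rw [PySem.Int.floordiv_eq_ediv_of_pos hposn]
          have := (Int.le_ediv_iff_mul_le hposn (a := 1) (b := num)).mpr (by omega)
          omega
        rw [if_pos hfd1, ← solDigitB_eq (PySem.Int.mod num n)]
        conv_rhs => rw [solToBase]
        rw [if_neg hsm]
        rw [solToBase_congr n hn2 _ num.toNat _ (by omega) (by omega) hdnn]
        simp
    · simp [hpos]

lemma solConvert_eq_toBase (n : Int) (hn2 : 2 ≤ n) (num : Int) (h0 : 0 ≤ num) :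
    solConvert n num = solToBase n (num.toNat + 1) num := by
  unfold solConvert
  rw [solConvertGo_eq n hn2 _ _ _ (by omega) h0]
  by_cases hpos : 0 < num
  · rw [if_pos hpos, List.append_nil, if_neg (solToBase_ne_nil n (by omega) num.toNat num h0)]
  · have hz : num = 0 := by omega
    subst hz
    rw [if_neg (by omega : ¬ (0:Int) < 0), List.nil_append, if_pos rfl]
    have h1 : solToBase n ((0:Int).toNat + 1) 0 = solDigitB 0 := by
      simp only [Int.toNat_zero, solToBase]
      rw [if_pos (by omega : (0:Int) < n)]
    rw [h1]
    decide

lemma solModIff (m p : Int) (_hm : 0 < m) (hp1 : 1 ≤ p) (hpm : p ≤ m) (q : Int) :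
    q % m = p - 1 ↔ (p - 1 - q) % m = 0 := by
  have h1 : (p - 1) % m = p - 1 := Int.emod_eq_of_lt (by omega) (by omega)
  constructor
  · intro h
    have := (Int.emod_emod_of_dvd (p - 1 - q) (dvd_refl m))
    have h2 : (p - 1 - q) % m = ((p - 1) % m - q % m) % m := by rw [Int.sub_emod]
    rw [h2, h1, h] ; simp
  · intro h
    have hd : m ∣ (p - 1 - q) := Int.dvd_of_emod_eq_zero h
    obtain ⟨c, hc⟩ := hd
    have : q = p - 1 - m * c := by omega
    rw [this]
    have e2 : p - 1 - m * c = p - 1 + (-c) * m := by ring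
    rw [e2, Int.add_mul_emod_self_right, h1]

lemma solDist_step (m p : Int) (hm : 0 < m) (q : Int)
    (h : (p - 1 - q) % m ≠ 0) : (p - 1 - (q + 1)) % m = (p - 1 - q) % m - 1 := by
  have hnn : 0 ≤ (p - 1 - q) % m := Int.emod_nonneg _ (by omega)
  have hlt : (p - 1 - q) % m < m := Int.emod_lt_of_pos _ hm
  have e1 : p - 1 - (q + 1) = (p - 1 - q) - 1 := by ring
  rw [e1, Int.sub_emod]
  by_cases hm2 : m = 1
  · exfalso; apply h; simp [hm2]
  · rw [show (1:Int) % m = 1 from Int.emod_eq_of_lt (by omega) (by omega)]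
    exact Int.emod_eq_of_lt (by omega) (by omega)

lemma solDist_wrap (m p : Int) (hm : 0 < m) (q : Int)
    (h : (p - 1 - q) % m = 0) : (p - 1 - (q + 1)) % m = m - 1 := by
  have e1 : p - 1 - (q + 1) = (p - 1 - q) - 1 := by ring
  rw [e1, Int.sub_emod, h]
  by_cases hm2 : m = 1
  · simp [hm2]
  · rw [show (1:Int) % m = 1 from Int.emod_eq_of_lt (by omega) (by omega)]
    rw [show (0:Int) - 1 = m - 1 + (-1) * m by ring, Int.add_mul_emod_self_right]
    exact Int.emod_eq_of_lt (by omega) (by omega)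

lemma solSel_getElem? (m p : Int) (hm : 0 < m) (hp1 : 1 ≤ p) (hpm : p ≤ m) :
    ∀ (cs : List Char) (q k : Nat),
      (solSel m p q cs)[k]? = cs[((p - 1 - (q : Int)) % m).toNat + k * m.toNat]? := by
  intro cs
  induction cs with
  | nil => intro q k; simp [solSel]
  | cons c cs ih =>
    intro q k
    simp only [solSel]
    have hnn : 0 ≤ (p - 1 - (q:Int)) % m := Int.emod_nonneg _ (by omega)
    have hlt : (p - 1 - (q:Int)) % m < m := Int.emod_lt_of_pos _ hm
    by_cases h : (q : Int) % m = p - 1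
    · have hd0 : (p - 1 - (q:Int)) % m = 0 := (solModIff m p hm hp1 hpm _).mp h
      rw [if_pos h]
      cases k with
      | zero => simp [hd0]
      | succ k =>
        have hw : (p - 1 - ((q:Int) + 1)) % m = m - 1 := solDist_wrap m p hm _ hd0
        have hih := ih (q + 1) k
        push_cast at hih
        rw [List.getElem?_cons_succ, hih, hw, hd0]
        have e : (0:Int).toNat + (k + 1) * m.toNat = ((m - 1).toNat + k * m.toNat) + 1 := by
          have : (k + 1) * m.toNat = k * m.toNat + m.toNat := by ring
          omega
        rw [e, List.getElem?_cons_succ]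
    · rw [if_neg h]
      have hd : (p - 1 - (q:Int)) % m ≠ 0 := fun hc => h ((solModIff m p hm hp1 hpm _).mpr hc)
      have hs : (p - 1 - ((q:Int) + 1)) % m = (p - 1 - (q:Int)) % m - 1 := solDist_step m p hm _ hd
      have hih := ih (q + 1) k
      push_cast at hih
      rw [hih, hs]
      have e : ((p - 1 - (q:Int)) % m).toNat + k * m.toNat
          = (((p - 1 - (q:Int)) % m - 1).toNat + k * m.toNat) + 1 := by omega
      rw [e, List.getElem?_cons_succ]

lemma solSel_append (m p : Int) :
    ∀ (cs ds : List Char) (q : Nat),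
      solSel m p q (cs ++ ds) = solSel m p q cs ++ solSel m p (q + cs.length) ds := by
  intro cs
  induction cs with
  | nil => intro ds q; simp [solSel]
  | cons c cs ih =>
    intro ds q
    simp only [List.cons_append, solSel, ih]
    have e : q + 1 + cs.length = q + (cs.length + 1) := by omega
    split <;> simp [e]

lemma solStream_succ (n : Int) (N : Nat) :
    solStream n (N + 1) = solStream n N ++ solConvert n (N : Int) := by
  simp [solStream, List.range_succ]

lemma solConvert_ne_nil (n num : Int) : solConvert n num ≠ [] := by
  simp only [solConvert]
  split
  · simp
  · assumption

lemma solStream_length_ge (n : Int) : ∀ N : Nat, N ≤ (solStream n N).length := by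
  intro N
  induction N with
  | zero => simp
  | succ N ih =>
    rw [solStream_succ, List.length_append]
    have := List.length_pos_iff.mpr (solConvert_ne_nil n (N : Int))
    omega

lemma solStream_prefix (n : Int) (A B : Nat) (h : A ≤ B) :
    ∃ r, solStream n B = solStream n A ++ r := by
  obtain ⟨d, rfl⟩ : ∃ d, B = A + d := ⟨B - A, by omega⟩
  clear h
  induction d with
  | zero => exact ⟨[], by simp⟩
  | succ d ih =>
    obtain ⟨r, hr⟩ := ih
    exact ⟨r ++ solConvert n ((A + d : Nat) : Int), by
      rw [show A + (d+1) = (A+d) + 1 from rfl, solStream_succ, hr, List.append_assoc]⟩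

lemma solStream_getElem?_eq (n : Int) (A B : Nat) (hAB : A ≤ B) (j : Nat)
    (hj : j < (solStream n A).length) :
    (solStream n B)[j]? = (solStream n A)[j]? := by
  obtain ⟨r, hr⟩ := solStream_prefix n A B hAB
  rw [hr, List.getElem?_append_left hj]

lemma solInner_spec (t m p : Int) (hm : 0 < m) (_hp1 : 1 ≤ p) (_hpm : p ≤ m) (ht : 0 < t) :
    ∀ (cs ans : List Char) (q : Nat), (ans.length : Int) < t →
      ∃ tb, solInner t m p cs ans ((q : Int) % m + 1) =
          ((ans ++ solSel m p q cs).take t.toNat, tb) ∧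
        (((ans ++ solSel m p q cs).length : Int) < t →
          tb = ((q + cs.length : Nat) : Int) % m + 1) := by
  intro cs
  induction cs with
  | nil =>
    intro ans q hlt
    refine ⟨(q : Int) % m + 1, ?_, ?_⟩
    · simp only [solInner, solSel, List.append_nil]
      rw [List.take_of_length_le (by omega)]
    · intro _; simp
  | cons c cs ih =>
    intro ans q hlt
    have hmodstep : PySem.Int.mod ((q : Int) % m + 1) m + 1 = (((q + 1 : Nat) : Int)) % m + 1 := by
      rw [PySem.Int.mod_eq_emod_of_pos hm]
      push_cast
      rw [Int.add_emod ((q:Int) % m) 1 m, Int.emod_emod_of_dvd _ (dvd_refl m), ← Int.add_emod]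
    simp only [solInner, solSel]
    by_cases h : (q : Int) % m = p - 1
    · rw [if_pos (show (q : Int) % m + 1 = p by omega), if_pos h]
      by_cases hdone : ((ans ++ [c]).length : Int) = t
      · rw [if_pos hdone]
        refine ⟨(q : Int) % m + 1, ?_, ?_⟩
        · have : ans ++ c :: solSel m p (q + 1) cs = (ans ++ [c]) ++ solSel m p (q + 1) cs := by
            simp
          rw [this, show t.toNat = (ans ++ [c]).length by omega,
            List.take_append_of_le_length (le_refl _), List.take_length]
        · intro hfull
          exfalso
          have : (ans ++ [c]).length ≤ (ans ++ c :: solSel m p (q + 1) cs).length := by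
            simp
          omega
      · rw [if_neg hdone]
        have hlt' : (((ans ++ [c]).length : Nat) : Int) < t := by
          have : (ans ++ [c]).length = ans.length + 1 := by simp
          omega
        obtain ⟨tb, heq, htb⟩ := ih (ans ++ [c]) (q + 1) hlt'
        rw [hmodstep]
        refine ⟨tb, ?_, ?_⟩
        · rw [heq]
          congr 1
          simp
        · intro hfull
          have e : (ans ++ [c]) ++ solSel m p (q + 1) cs = ans ++ c :: solSel m p (q + 1) cs := by
            simp
          rw [htb (by rw [e]; exact_mod_cast hfull),
            show q + 1 + cs.length = q + (c :: cs).length from by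
              simp only [List.length_cons]; omega]
    · rw [if_neg (show ¬ ((q : Int) % m + 1 = p) by omega), if_neg h]
      obtain ⟨tb, heq, htb⟩ := ih ans (q + 1) hlt
      rw [hmodstep]
      refine ⟨tb, heq, ?_⟩
      intro hfull
      rw [htb hfull,
        show q + 1 + cs.length = q + (c :: cs).length from by
          simp only [List.length_cons]; omega]

lemma solOuter_stop (n t m p : Int) (f : Nat) (ans : List Char) (num tube : Int)
    (h : ¬ ((ans.length : Int) < t)) : solOuter n t m p f ans num tube = ans := by
  cases f <;> simp [solOuter, h]

lemma solSel_len_ge (n m p : Int) (hm : 0 < m) (hp1 : 1 ≤ p) (hpm : p ≤ m) (ht : 1 ≤ (t' : Nat))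
    (N : Nat)
    (hlen : (p - 1).toNat + (t' - 1) * m.toNat < (solStream n N).length) :
    t' ≤ (solSel m p 0 (solStream n N)).length := by
  have hidx := solSel_getElem? m p hm hp1 hpm (solStream n N) 0 (t' - 1)
  have e : ((p - 1 - ((0 : Nat) : Int)) % m).toNat = (p - 1).toNat := by
    rw [Nat.cast_zero, sub_zero, Int.emod_eq_of_lt (by omega) (by omega)]
  rw [e] at hidx
  have hx := List.getElem?_eq_getElem hlen
  rw [← hidx] at hx
  have h2 : ((solSel m p 0 (solStream n N))[t' - 1]?).isSome := by rw [hx]; rfl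
  simp at h2
  omega

lemma solOuter_spec (n t m p : Int) (hm : 0 < m) (hp1 : 1 ≤ p) (hpm : p ≤ m) (ht : 0 < t) :
    ∀ (f i : Nat) (ans : List Char),
      ans = solSel m p 0 (solStream n i) →
      (ans.length : Int) < t →
      (p - 1).toNat + (t.toNat - 1) * m.toNat < (solStream n (i + f)).length →
      solOuter n t m p f ans (i : Int) (((solStream n i).length : Int) % m + 1) =
        (solSel m p 0 (solStream n (i + f))).take t.toNat := by
  intro f
  induction f with
  | zero =>
    intro i ans hans hlt hlen
    exfalso
    have := solSel_len_ge n m p hm hp1 hpm (t' := t.toNat) (by omega) i hlen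
    rw [← hans] at this
    omega
  | succ f ih =>
    intro i ans hans hlt hlen
    rw [solOuter, if_pos hlt]
    obtain ⟨tb, heq, htb⟩ :=
      solInner_spec t m p hm hp1 hpm ht (solConvert n (i : Int)) ans ((solStream n i).length) hlt
    have hfull : ans ++ solSel m p ((solStream n i).length) (solConvert n (i : Int))
        = solSel m p 0 (solStream n (i + 1)) := by
      rw [hans, solStream_succ, solSel_append]
      simp
    rw [heq]
    simp only [hfull]
    by_cases hcase : (((solSel m p 0 (solStream n (i + 1))).length : Int) < t)
    · have htb' := htb (by rw [hfull]; exact hcase)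
      have htake : (solSel m p 0 (solStream n (i + 1))).take t.toNat
          = solSel m p 0 (solStream n (i + 1)) := List.take_of_length_le (by omega)
      rw [htake]
      have hlen1 : (solStream n i).length + (solConvert n (i : Int)).length
          = (solStream n (i + 1)).length := by
        rw [solStream_succ]; simp
      have htb'' : tb = (((solStream n (i + 1)).length : Int)) % m + 1 := by
        rw [htb', ← hlen1]
      rw [htb'',
        show ((i : Int) + 1) = (((i + 1 : Nat)) : Int) from by push_cast; ring]
      rw [ih (i + 1) _ rfl hcase
        (by rw [show (i + 1) + f = i + (f + 1) from by omega]; exact hlen)]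
      rw [show (i + 1) + f = i + (f + 1) from by omega]
    · rw [not_lt] at hcase
      have hstop : ¬ ((((solSel m p 0 (solStream n (i + 1))).take t.toNat).length : Int) < t) := by
        rw [not_lt, List.length_take]
        have : t.toNat ≤ (solSel m p 0 (solStream n (i + 1))).length := by omega
        omega
      rw [solOuter_stop _ _ _ _ f _ _ _ hstop]
      obtain ⟨r, hr⟩ := solStream_prefix n (i + 1) (i + (f + 1)) (by omega)
      rw [hr, solSel_append,
        List.take_append_of_le_length (by omega)]

lemma solGen_spec (n : Int) (hn2 : 2 ≤ n) (last : Int) :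
    ∀ (f i : Nat) (ds : List Char), ds = solStream n i →
      last < ((solStream n (i + f)).length : Int) →
      ∃ N : Nat, solGen n last f ds (i : Int) = solStream n N ∧
        last < ((solStream n N).length : Int) := by
  intro f
  induction f with
  | zero =>
    intro i ds hds hlast
    refine ⟨i, ?_, ?_⟩
    · simp only [solGen]; exact hds
    · simpa using hlast
  | succ f ih =>
    intro i ds hds hlast
    rw [solGen]
    by_cases h : ((ds.length : Int) ≤ last)
    · rw [if_pos h]
      have hext : ds ++ solToBase n ((i : Int).toNat + 1) (i : Int) = solStream n (i + 1) := by
        rw [hds, solStream_succ, ← solConvert_eq_toBase n hn2 _ (by positivity)]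
      obtain ⟨N, h1, h2⟩ := ih (i + 1) _ hext
        (by rw [show (i + 1) + f = i + (f + 1) from by omega]; exact hlast)
      refine ⟨N, ?_, h2⟩
      rw [show ((i : Int) + 1) = ((i + 1 : Nat) : Int) from by push_cast; ring]
      exact h1
    · rw [if_neg h]
      rw [not_le] at h
      exact ⟨i, hds, by rw [← hds]; omega⟩

lemma solGen_stop (n last : Int) (f : Nat) (ds : List Char) (i : Int)
    (h : ¬ ((ds.length : Int) ≤ last)) : solGen n last f ds i = ds := by
  cases f <;> simp [solGen, h]

lemma solDist_zero (m p : Int) (hp1 : 1 ≤ p) (hpm : p ≤ m) :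
    ((p - 1 - ((0 : Nat) : Int)) % m).toNat = (p - 1).toNat := by
  rw [Nat.cast_zero, sub_zero, Int.emod_eq_of_lt (by omega) (by omega)]

-- ===== VERDICT (by name: the statement is the Claim_ definition above) =====
theorem solution_spec : Claim_equal_solution := by
  unfold Claim_equal_solution Spec_solution
  intro n t m p _ hpre
  by_cases ht : 0 < t
  case neg =>
    rw [not_lt] at ht
    simp only [solution, solution_alt]
    rw [solOuter_stop n t m p _ [] 0 1 (by simp; omega)]
    rw [if_neg (by omega : ¬ (0 : Int) < t)]
    rw [solGen_stop n (-1) _ [] 0 (by norm_num)]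
    rw [PySem.List.pyRange_one_eq_nil (by omega)]
    simp
  case pos =>
    have hpre' : 1 ≤ t ∧ 2 ≤ n ∧ n ≤ 55241 ∧ 1 ≤ p ∧ p ≤ m := by
      rcases hpre with h | h
      · omega
      · exact h
    obtain ⟨ht1, hn2, _hn55, hp1, hpm⟩ := hpre'
    have hm : 0 < m := by omega
    have hFi : (((p + t * m + 1).toNat : Nat) : Int) = p + t * m + 1 :=
      Int.toNat_of_nonneg (by nlinarith)
    set F : Nat := (p + t * m + 1).toNat with hF
    have hprod : (((t.toNat - 1) * m.toNat : Nat) : Int) = (t - 1) * m := by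
      rw [Nat.cast_mul, Nat.cast_sub (by omega : 1 ≤ t.toNat)]
      rw [Nat.cast_one, Int.toNat_of_nonneg (by omega : (0:Int) ≤ t),
        Int.toNat_of_nonneg (by omega : (0:Int) ≤ m)]
    have hp0 : (((p - 1).toNat : Nat) : Int) = p - 1 := Int.toNat_of_nonneg (by omega)
    have hlenF : (p - 1).toNat + (t.toNat - 1) * m.toNat < F := by
      have hZ : (p - 1) + (t - 1) * m < p + t * m + 1 := by nlinarith
      have hc : (((p - 1).toNat + (t.toNat - 1) * m.toNat : Nat) : Int) < ((F : Nat) : Int) := by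
        rw [Nat.cast_add, hp0, hprod, hFi]
        exact hZ
      exact_mod_cast hc
    have hstreamF := solStream_length_ge n F
    simp only [solution, solution_alt]
    -- A side
    have hA : solOuter n t m p F [] 0 1 = (solSel m p 0 (solStream n F)).take t.toNat := by
      have h0 : ([] : List Char) = solSel m p 0 (solStream n 0) := by
        simp [solStream, solSel]
      have hspec := solOuter_spec n t m p hm hp1 hpm ht F 0 [] h0 (by simpa using ht)
        (by simpa using (by omega : (p - 1).toNat + (t.toNat - 1) * m.toNat < (solStream n F).length))
      simp only [Nat.cast_zero, Nat.zero_add] at hspec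
      rw [show ((solStream n 0).length : Int) = 0 from by simp [solStream], Int.zero_emod] at hspec
      simpa using hspec
    rw [hA, if_pos ht]
    -- B side
    have hlastF : (p - 1 + (t - 1) * m) < ((solStream n (0 + F)).length : Int) := by
      have : F ≤ (solStream n (0 + F)).length := by simpa using hstreamF
      have h2 : ((F : Nat) : Int) ≤ ((solStream n (0 + F)).length : Int) := by exact_mod_cast this
      rw [hFi] at h2
      nlinarith
    obtain ⟨N, hgen, hN⟩ := solGen_spec n hn2 (p - 1 + (t - 1) * m) F 0 [] (by simp [solStream]) hlastF
    simp only [Nat.cast_zero] at hgen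
    rw [hgen]
    -- elementwise equality
    apply congrArg String.ofList
    apply List.ext_getElem?
    intro k
    by_cases hk : k < t.toNat
    · -- index bound facts
      have hkm : k * m.toNat ≤ (t.toNat - 1) * m.toNat :=
        Nat.mul_le_mul_right _ (by omega)
      have hidxF : (p - 1).toNat + k * m.toNat < (solStream n F).length := by omega
      have hidxI : ((((p - 1).toNat + k * m.toNat : Nat)) : Int) = p - 1 + (k : Int) * m := by
        rw [Nat.cast_add, hp0, Nat.cast_mul, Int.toNat_of_nonneg (by omega : (0:Int) ≤ m)]
      have hkt : ((k : Nat) : Int) ≤ t - 1 := by omega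
      have hidxlast : p - 1 + (k : Int) * m ≤ p - 1 + (t - 1) * m := by
        have := mul_le_mul_of_nonneg_right hkt (by omega : (0:Int) ≤ m)
        omega
      have hidxN : (p - 1).toNat + k * m.toNat < (solStream n N).length := by
        have : (p - 1 + (k : Int) * m) < ((solStream n N).length : Int) := by omega
        rw [← hidxI] at this
        exact_mod_cast this
      -- LHS
      have hsel := solSel_getElem? m p hm hp1 hpm (solStream n F) 0 k
      rw [solDist_zero m p hp1 hpm] at hsel
      rw [List.getElem?_take_of_lt hk, hsel]
      -- RHS
      rw [show t = ((t.toNat : Nat) : Int) from (Int.toNat_of_nonneg ht.le).symm,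
        PySem.List.getElem?_map_pyRange_zero _ t.toNat k hk]
      have hnn : (0 : Int) ≤ p - 1 + (k : Int) * m := by
        have : (0 : Int) ≤ (k : Int) * m := mul_nonneg (by positivity) (by omega)
        omega
      have hltN : (p - 1 + (k : Int) * m) < ((solStream n N).length : Int) := by omega
      rw [PySem.List.pyGetD_eq_getElem _ '?' hnn hltN]
      have htn : (p - 1 + (k : Int) * m).toNat = (p - 1).toNat + k * m.toNat := by omega
      rw [← List.getElem?_eq_getElem (htn ▸ hidxN : (p - 1 + (k : Int) * m).toNat < (solStream n N).length)]
      rw [htn]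
      rcases le_total F N with hFN | hNF
      · exact (solStream_getElem?_eq n F N hFN _ hidxF).symm
      · exact solStream_getElem?_eq n N F hNF _ hidxN
    · rw [List.getElem?_eq_none_iff.mpr
        (by rw [List.length_take]; omega)]
      rw [show t = ((t.toNat : Nat) : Int) from (Int.toNat_of_nonneg ht.le).symm]
      rw [List.getElem?_eq_none_iff.mpr
        (by rw [List.length_map, PySem.List.length_pyRange_one]; omega)]
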